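-- pv_equiv track=rewrite | github.com/core-unit-bioinformatics/workflow-smk-longread-variant-calling | workflow/scripts/plotting/plot_win_read_depth.py | determine_xticks_and_chrom_boundaries
-- ===== SOURCE A (Python) =====
-- def determine_xticks_and_chrom_boundaries(alt_colors, chrom_order_nums, chrom_label):
--
--     chrom_boundaries = []
--     x_tick_pos = []
--     x_tick_labels = []
--
--     left_border = 0
--     right_border = None
--     colorize = False
--     for pos, (color, x_label) in enumerate(zip(alt_colors, chrom_order_nums)):
--         try:
--             next_color = alt_colors[pos+1]
--         except IndexError:
--             right_border = pos
--             break
--         if color != next_color: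
--             right_border = pos
--             x_tick = left_border + ((right_border - left_border) // 2)
--             x_tick_pos.append(x_tick)
--             x_tick_labels.append(chrom_label[x_label].strip("chr"))
--             if colorize:
--                 assert right_border is not None
--                 chrom_boundaries.append((left_border, right_border))
--                 colorize = False
--             else:
--                 colorize = True
--             left_border = pos+1
--             right_border = None
--
--     if right_border is not None and colorize:
--         chrom_boundaries.append((left_border, right_border))
--         x_tick = left_border + ((right_border - left_border) // 2)
--         x_tick_pos.append(x_tick)
--         x_tick_labels.append(x_label)
--
--     return x_tick_pos, x_tick_labels, chrom_boundaries
-- ===== SOURCE B (Python) =====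
-- def determine_xticks_and_chrom_boundaries(alt_colors, chrom_order_nums, chrom_label):
--     n = len(alt_colors)
--     m = len(chrom_order_nums)
--     # first pass: completed runs of consecutive equal colors, as (start, end) index pairs
--     runs = []
--     start = 0
--     for i in range(1, n):
--         if alt_colors[i] != alt_colors[i - 1]:
--             runs.append((start, i - 1))
--             start = i
--     # second pass: one tick per completed run that lies in the zipped range;
--     # every second run (odd run index) is a shaded chromosome band
--     x_tick_pos = []
--     x_tick_labels = []
--     chrom_boundaries = []
--     for idx, (s, e) in enumerate(runs):
--         if e >= m:
--             break
--         x_tick_pos.append(s + (e - s) // 2)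
--         x_tick_labels.append(chrom_label[chrom_order_nums[e]].strip("chr"))
--         if idx % 2 == 1:
--             chrom_boundaries.append((s, e))
--     return x_tick_pos, x_tick_labels, chrom_boundaries
-- ===== Notes on version B (the rewrite author's own statement) =====
-- stated objective: alternative
-- what changed: B replaces A's single stateful scan (lookahead try/except, colorize toggle, left/right border bookkeeping) by two plain passes: first build the list of completed color runs (start,end), then emit one tick per run inside the zip range and a boundary for every odd-indexed run. Pre_ excludes inputs where chrom_label misses a looked-up key (A raises KeyError) and inputs where A's final fallback fires (last run reaches the end of alt_colors in colorize state), since there A appends the raw integer x_label, not a str, to the label list.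
-- outside the precondition, e.g. on determine_xticks_and_chrom_boundaries(['a', 'b'], [0, 0], {0: ''}): A returns ([0, 1], ['', 0], [(1, 1)]), B returns ([0], [''], [])
import Mathlib
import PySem

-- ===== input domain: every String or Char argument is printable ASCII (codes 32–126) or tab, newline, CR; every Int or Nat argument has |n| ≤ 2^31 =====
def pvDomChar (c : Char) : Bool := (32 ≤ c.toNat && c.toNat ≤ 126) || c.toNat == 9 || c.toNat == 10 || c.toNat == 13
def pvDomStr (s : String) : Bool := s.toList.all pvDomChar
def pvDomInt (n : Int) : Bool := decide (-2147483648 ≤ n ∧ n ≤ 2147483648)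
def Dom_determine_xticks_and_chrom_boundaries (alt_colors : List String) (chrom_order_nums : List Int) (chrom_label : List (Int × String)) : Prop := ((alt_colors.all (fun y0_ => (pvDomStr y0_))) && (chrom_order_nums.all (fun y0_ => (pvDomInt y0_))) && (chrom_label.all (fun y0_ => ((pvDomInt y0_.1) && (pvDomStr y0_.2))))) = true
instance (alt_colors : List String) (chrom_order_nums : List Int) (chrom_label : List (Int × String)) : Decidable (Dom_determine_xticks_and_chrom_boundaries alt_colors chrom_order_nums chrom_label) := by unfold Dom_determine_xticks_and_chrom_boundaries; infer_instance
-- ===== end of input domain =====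

-- B replaces A's single stateful scan (colorize toggle, border bookkeeping, lookahead break) by two
-- plain passes: list the completed color runs first, then emit ticks/boundaries per run (objective:
-- alternative decomposition, same cost).

-- ===== PORT A =====

-- chrom_label[x_label].strip("chr")  (shared by both Pythons verbatim; KeyError excluded by Pre_)
def pvLab (chrom_label : List (Int × String)) (nums : List Int) (pos : Nat) : String :=
  PySem.Str.stripChars (((PySem.Dict.mk chrom_label).get? (nums.getD pos 0)).getD "") "chr"

-- A's for-loop over enumerate(zip(alt_colors, chrom_order_nums)), with the try/except lookahead as a
-- bounds check and the post-loop 'right_border is not None and colorize' block inlined at the break.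
-- In the final block Python appends the raw int x_label (not a str) to the label list; it is ported
-- as its decimal string and those inputs are excluded by Pre_.
def aLoop (alt : List String) (nums : List Int) (lbl : List (Int × String))
    (pos left : Nat) (colorize : Bool)
    (t : List Int) (l : List String) (b : List (Int × Int)) :
    List Int × List String × (List (Int × Int)) :=
  if _h : pos < alt.length ∧ pos < nums.length then
    if pos + 1 < alt.length then
      if alt.getD pos "" ≠ alt.getD (pos + 1) "" then
        aLoop alt nums lbl (pos + 1) (pos + 1) (!colorize)
          (t ++ [((left + (pos - left) / 2 : Nat) : Int)])
          (l ++ [pvLab lbl nums pos])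
          (if colorize then b ++ [((left : Int), (pos : Int))] else b)
      else
        aLoop alt nums lbl (pos + 1) left colorize t l b
    else
      -- IndexError on alt_colors[pos+1]: right_border = pos; break; then the final block
      if colorize then
        (t ++ [((left + (pos - left) / 2 : Nat) : Int)],
         l ++ [PySem.Int.toStr (nums.getD pos 0)],
         b ++ [((left : Int), (pos : Int))])
      else (t, l, b)
  else (t, l, b)
termination_by alt.length - pos
decreasing_by all_goals omega

def determine_xticks_and_chrom_boundaries (alt_colors : List String) (chrom_order_nums : List Int) (chrom_label : List (Int × String)) : List Int × List String × (List (Int × Int)) :=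
  aLoop alt_colors chrom_order_nums chrom_label 0 0 false [] [] []

-- ===== PORT B =====

-- first pass of Source B: for i in range(1, n): if alt[i] != alt[i-1]: runs.append((start, i-1)); start = i
def bRuns (alt : List String) (i start : Nat) : List (Nat × Nat) :=
  if h : i < alt.length then
    if alt.getD i "" ≠ alt.getD (i - 1) "" then
      (start, i - 1) :: bRuns alt (i + 1) i
    else
      bRuns alt (i + 1) start
  else []
termination_by alt.length - i
decreasing_by all_goals omega

-- second pass of Source B: for idx, (s, e) in enumerate(runs): break on e >= m, else tick/label/boundary
def bLoop (m : Nat) (nums : List Int) (lbl : List (Int × String))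
    (runs : List (Nat × Nat)) (idx : Nat)
    (t : List Int) (l : List String) (b : List (Int × Int)) :
    List Int × List String × (List (Int × Int)) :=
  match runs with
  | [] => (t, l, b)
  | (s, e) :: rs =>
    if e ≥ m then (t, l, b)
    else
      bLoop m nums lbl rs (idx + 1)
        (t ++ [((s + (e - s) / 2 : Nat) : Int)])
        (l ++ [pvLab lbl nums e])
        (if idx % 2 == 1 then b ++ [((s : Int), (e : Int))] else b)

def determine_xticks_and_chrom_boundaries_alt (alt_colors : List String) (chrom_order_nums : List Int) (chrom_label : List (Int × String)) : List Int × List String × (List (Int × Int)) :=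
  bLoop chrom_order_nums.length chrom_order_nums chrom_label (bRuns alt_colors 1 0) 0 [] [] []

-- ===== PRECONDITION & SPEC =====

-- number of adjacent color changes in alt_colors (a shape property of the input)
def pvCnt (alt : List String) : Nat :=
  ((List.range (alt.length - 1)).filter (fun e => alt.getD e "" ≠ alt.getD (e + 1) "")).length

-- Pre_ excludes (i) inputs where a looked-up chrom_label key is missing — A raises KeyError — and
-- (ii) inputs where A's final fallback fires (alt_colors nonempty, no longer than chrom_order_nums,
-- with an odd number of color changes): there A appends the raw integer x_label, not a str, to the
-- string label list, a value outside the declared List String type.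
def Pre_determine_xticks_and_chrom_boundaries (alt_colors : List String) (chrom_order_nums : List Int) (chrom_label : List (Int × String)) : Prop :=
  (∀ e < alt_colors.length, e + 1 < alt_colors.length → e < chrom_order_nums.length →
      alt_colors.getD e "" ≠ alt_colors.getD (e + 1) "" →
      (((PySem.Dict.mk chrom_label).get? (chrom_order_nums.getD e 0)).isSome = true))
  ∧ ¬(0 < alt_colors.length ∧ alt_colors.length ≤ chrom_order_nums.length ∧ pvCnt alt_colors % 2 = 1)

instance (alt_colors : List String) (chrom_order_nums : List Int) (chrom_label : List (Int × String)) : Decidable (Pre_determine_xticks_and_chrom_boundaries alt_colors chrom_order_nums chrom_label) := by unfold Pre_determine_xticks_and_chrom_boundaries; infer_instance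

def pvWitness_determine_xticks_and_chrom_boundaries : List String × List Int × (List (Int × String)) :=
  (["a", "b", "c"], [1, 2, 3], [(1, "chr1"), (2, "chr2"), (3, "chr3")])

def Spec_determine_xticks_and_chrom_boundaries (alt_colors : List String) (chrom_order_nums : List Int) (chrom_label : List (Int × String)) (out : List Int × List String × (List (Int × Int))) : Prop := out = determine_xticks_and_chrom_boundaries_alt alt_colors chrom_order_nums chrom_label
instance (alt_colors : List String) (chrom_order_nums : List Int) (chrom_label : List (Int × String)) (out : List Int × List String × (List (Int × Int))) : Decidable (Spec_determine_xticks_and_chrom_boundaries alt_colors chrom_order_nums chrom_label out) := by unfold Spec_determine_xticks_and_chrom_boundaries; infer_instance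

-- ===== CLAIM (what is proved, stated in full; the proofs are below) =====
def Claim_equal_determine_xticks_and_chrom_boundaries : Prop := ∀ (alt_colors : List String) (chrom_order_nums : List Int) (chrom_label : List (Int × String)), Dom_determine_xticks_and_chrom_boundaries alt_colors chrom_order_nums chrom_label → Pre_determine_xticks_and_chrom_boundaries alt_colors chrom_order_nums chrom_label → Spec_determine_xticks_and_chrom_boundaries alt_colors chrom_order_nums chrom_label (determine_xticks_and_chrom_boundaries alt_colors chrom_order_nums chrom_label)

-- ===== LEMMAS AND PROOFS =====

-- change count from position pos on (pvCnt restricted to indices ≥ pos); proof-side only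
def pvCntFrom (alt : List String) (pos : Nat) : Nat :=
  if _h : pos + 1 < alt.length then
    (if alt.getD pos "" ≠ alt.getD (pos + 1) "" then 1 else 0) + pvCntFrom alt (pos + 1)
  else 0
termination_by alt.length - pos
decreasing_by omega

theorem pvCntFrom_eq_range' (alt : List String) (pos : Nat) :
    pvCntFrom alt pos
      = ((List.range' pos (alt.length - 1 - pos)).filter
          (fun e => alt.getD e "" ≠ alt.getD (e + 1) "")).length := by
  rw [pvCntFrom]
  split
  · rename_i h
    rw [pvCntFrom_eq_range' alt (pos + 1)]
    have hn : alt.length - 1 - pos = (alt.length - 1 - (pos + 1)) + 1 := by omega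
    rw [hn, List.range'_succ, List.filter_cons]
    by_cases hc : alt.getD pos "" = alt.getD (pos + 1) ""
    · rw [if_neg (fun hne => hne hc), if_neg (by simpa using hc)]
      omega
    · rw [if_pos hc, if_pos (by simpa using hc), List.length_cons]
      omega
  · rename_i h
    have hn : alt.length - 1 - pos = 0 := by omega
    rw [hn]
    simp
termination_by alt.length - pos
decreasing_by omega

theorem pvCntFrom_zero (alt : List String) : pvCntFrom alt 0 = pvCnt alt := by
  rw [pvCntFrom_eq_range', pvCnt, List.range_eq_range']
  norm_num

-- the head of any run list produced by bRuns alt i start ends at index ≥ i - 1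
theorem bRuns_head_end_ge (alt : List String) (i start : Nat) :
    ∀ s e rs, bRuns alt i start = (s, e) :: rs → i - 1 ≤ e := by
  intro s e rs h
  rw [bRuns] at h
  split at h
  · split at h
    · injection h with h1 _
      injection h1 with _ h2
      omega
    · have := bRuns_head_end_ge alt (i + 1) start s e rs h
      omega
  · exact absurd h (by simp)
termination_by alt.length - i
decreasing_by omega

theorem not_mod_two (idx : Nat) : (!(idx % 2 == 1)) = ((idx + 1) % 2 == 1) := by
  rcases Nat.mod_two_eq_zero_or_one idx with h | h <;> simp [Nat.add_mod, h]

-- main lockstep lemma: from the start of any run (left = run start = B\'s start, pos = current index,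
-- A\'s colorize = parity of B\'s run index idx), A\'s remaining scan equals B\'s remaining run loop.
theorem pvMain (alt : List String) (nums : List Int) (lbl : List (Int × String))
    (pos idx left : Nat) (t : List Int) (l : List String) (b : List (Int × Int))
    (hpos : pos < alt.length)
    (H : alt.length ≤ nums.length → (idx + pvCntFrom alt pos) % 2 = 0) :
    aLoop alt nums lbl pos left (idx % 2 == 1) t l b
      = bLoop nums.length nums lbl (bRuns alt (pos + 1) left) idx t l b := by
  rw [aLoop]
  by_cases hm : pos < nums.length
  · rw [dif_pos ⟨hpos, hm⟩]
    by_cases hnext : pos + 1 < alt.length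
    · rw [if_pos hnext, bRuns, dif_pos hnext]
      simp only [Nat.add_sub_cancel]
      by_cases hc : alt.getD pos "" = alt.getD (pos + 1) ""
      · -- no color change: both sides skip to pos + 1
        rw [if_neg (fun hne => hne hc), if_neg (fun hne => hne hc.symm)]
        exact pvMain alt nums lbl (pos + 1) idx left t l b hnext
          (by intro hnm
              have hh := H hnm
              rw [pvCntFrom, dif_pos hnext, if_neg (fun hne => hne hc)] at hh
              omega)
      · -- color change at pos: both sides emit the tick/label/boundary of run (left, pos)
        rw [if_pos hc, if_pos (fun heq => hc heq.symm)]
        simp only [bLoop]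
        rw [if_neg (show ¬ pos ≥ nums.length from by omega), not_mod_two]
        exact pvMain alt nums lbl (pos + 1) (idx + 1) (pos + 1) _ _ _ hnext
          (by intro hnm
              have hh := H hnm
              rw [pvCntFrom, dif_pos hnext, if_pos hc] at hh
              omega)
    · -- pos is the last index of alt_colors and the zip reaches it: A breaks; the parity bound in H
      -- forces colorize = false, so the final block is skipped; B\'s run list is exhausted too
      rw [if_neg hnext]
      have hnm : alt.length ≤ nums.length := by omega
      have h0 : pvCntFrom alt pos = 0 := by rw [pvCntFrom, dif_neg hnext]
      have hidx : idx % 2 = 0 := by have := H hnm; omega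
      rw [if_neg (show ¬ ((idx % 2 == 1) = true) from by simp [hidx]), bRuns, dif_neg hnext]
      simp only [bLoop]
  · -- the zip is exhausted before the end of alt_colors: A stops; every remaining run ends at an
    -- index ≥ pos ≥ len(chrom_order_nums), so B\'s loop breaks at once
    rw [dif_neg (by omega)]
    cases hr : bRuns alt (pos + 1) left with
    | nil => simp only [bLoop]
    | cons p rs =>
      obtain ⟨s, e⟩ := p
      have := bRuns_head_end_ge alt (pos + 1) left s e rs hr
      simp only [bLoop]
      rw [if_pos (show e ≥ nums.length from by omega)]
termination_by alt.length - pos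
decreasing_by all_goals omega

-- ===== VERDICT (by name: the statement is the Claim_ definition above) =====
theorem determine_xticks_and_chrom_boundaries_spec : Claim_equal_determine_xticks_and_chrom_boundaries := by
  unfold Claim_equal_determine_xticks_and_chrom_boundaries
  intro alt nums lbl _hdom hpre
  unfold Spec_determine_xticks_and_chrom_boundaries
  unfold determine_xticks_and_chrom_boundaries determine_xticks_and_chrom_boundaries_alt
  cases alt with
  | nil =>
    rw [aLoop, dif_neg (by simp), bRuns, dif_neg (by simp)]
    simp only [bLoop]
  | cons c cs =>
    have h0 : (false : Bool) = (0 % 2 == 1) := by decide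
    rw [h0]
    exact pvMain (c :: cs) nums lbl 0 0 0 [] [] [] (by simp)
      (by intro hnm
          rw [pvCntFrom_zero]
          have h2 := hpre.2
          have hcnt : ¬ (pvCnt (c :: cs) % 2 = 1) := fun h => h2 ⟨by simp, hnm, h⟩
          omega)
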